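-- pv_equiv track=rewrite | github.com/Gamrix/terraforming-mars-mcp | terraforming_mars_mcp/observed_cards.py | _append_unique
-- ===== SOURCE A (Python) =====
-- def _append_unique(values: list[str], additions: list[str]) -> bool:
--     existing = set(values)
--     changed = False
--     for item in additions:
--         if item not in existing:
--             values.append(item)
--             existing.add(item)
--             changed = True
--     return changed
-- ===== SOURCE B (Python) =====
-- def _append_unique(values: list[str], additions: list[str]) -> bool:
--     k = len(dict.fromkeys(values))
--     new = list(dict.fromkeys(values + additions))[k:]
--     values.extend(new)
--     return bool(new)
-- ===== Notes on version B (the rewrite author's own statement) =====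
-- stated objective: alternative
-- what changed: Replaces A's element-by-element loop with a growing seen-set and a changed flag by a loop-free formulation: ordered-dedup of values++additions via dict.fromkeys, slice off the first len(dict.fromkeys(values)) entries to get the new items, extend once and return bool(new).
import Mathlib
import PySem

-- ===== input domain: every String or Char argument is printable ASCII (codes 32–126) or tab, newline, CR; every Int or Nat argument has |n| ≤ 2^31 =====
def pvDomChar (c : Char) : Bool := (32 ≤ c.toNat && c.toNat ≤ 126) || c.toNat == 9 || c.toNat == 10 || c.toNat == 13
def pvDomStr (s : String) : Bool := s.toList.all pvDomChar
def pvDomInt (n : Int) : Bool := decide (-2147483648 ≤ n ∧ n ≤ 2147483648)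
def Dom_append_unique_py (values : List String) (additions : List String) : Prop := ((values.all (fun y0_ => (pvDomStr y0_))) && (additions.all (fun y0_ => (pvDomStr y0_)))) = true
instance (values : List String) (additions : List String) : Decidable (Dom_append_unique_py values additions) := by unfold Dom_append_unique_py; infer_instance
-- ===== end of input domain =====

-- B replaces A's element-by-element loop (growing seen-set, changed flag) by a loop-free
-- dedup-of-the-concatenation and a slice; equivalence proved here is about the RETURN value
-- (B performs the same in-place extension of `values` in Python).

-- ===== PORT A =====
-- the for-loop of A, with state (existing, values, changed)
def appendUniqueLoopA (existing : PySem.Set String) (values : List String) (changed : Bool) : List String → Bool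
  | [] => changed
  | item :: rest =>
    if PySem.Set.contains existing item then
      appendUniqueLoopA existing values changed rest
    else
      appendUniqueLoopA (PySem.Set.add existing item) (values ++ [item]) true rest

def append_unique_py (values : List String) (additions : List String) : Bool :=
  appendUniqueLoopA (PySem.Set.ofList values) values false additions

-- ===== PORT B =====
def append_unique_py_alt (values : List String) (additions : List String) : Bool :=
  let k := (PySem.List.dedup values).length                                   -- len(dict.fromkeys(values))
  let new := PySem.List.slice (PySem.List.dedup (values ++ additions)) (some (k : Int)) none
  !new.isEmpty                                                                -- bool(new)

-- ===== PRECONDITION & SPEC =====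
def Spec_append_unique_py (values : List String) (additions : List String) (out : Bool) : Prop := out = append_unique_py_alt values additions
instance (values : List String) (additions : List String) (out : Bool) : Decidable (Spec_append_unique_py values additions out) := by unfold Spec_append_unique_py; infer_instance

-- ===== CLAIM =====
def Claim_equal_append_unique_py : Prop := ∀ (values : List String) (additions : List String), Dom_append_unique_py values additions → Spec_append_unique_py values additions (append_unique_py values additions)

-- ===== LEMMAS AND PROOFS =====

-- A's loop returns `changed OR (some remaining item is outside `existing`)`.
theorem appendUniqueLoopA_eq (adds : List String) :
    ∀ (existing : PySem.Set String) (values : List String) (changed : Bool),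
      appendUniqueLoopA existing values changed adds
        = (changed || adds.any (fun x => !(PySem.Set.contains existing x))) := by
  induction adds with
  | nil => intro existing values changed; simp [appendUniqueLoopA]
  | cons item rest ih =>
    intro existing values changed
    by_cases h : PySem.Set.contains existing item
    · simp [appendUniqueLoopA, ih, Bool.or_left_comm]
    · simp [appendUniqueLoopA, ih, Bool.or_left_comm]

-- ===== VERDICT =====
theorem append_unique_py_spec : Claim_equal_append_unique_py := by
  intro values additions _
  unfold Spec_append_unique_py append_unique_py append_unique_py_alt
  rw [appendUniqueLoopA_eq, Bool.false_or]
  simp only [PySem.List.slice_from_natCast, PySem.List.dedup_eq_ofList,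
      PySem.Set.ofList_append, PySem.Set.update_eq_append_filter,
      List.drop_left]
  rw [Bool.eq_iff_iff]
  simp [List.any_eq_true, List.filter_eq_nil_iff, PySem.Set.mem_ofList]
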